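-- pv_equiv track=rewrite | github.com/Ayhzer/whisper-transcription-gui | whisper_gui.py | parse_drop_paths
-- ===== SOURCE A (Python) =====
-- def parse_drop_paths(data):
--     """Parse tkinterdnd2 drop data which may contain multiple paths (space or brace-separated)."""
--     data = data.strip()
--     paths = []
--     i = 0
--     while i < len(data):
--         if data[i] == '{':
--             end = data.index('}', i)
--             paths.append(data[i+1:end])
--             i = end + 1
--         else:
--             j = i
--             while j < len(data) and data[j] != ' ':
--                 j += 1
--             token = data[i:j].strip()
--             if token:
--                 paths.append(token)
--             i = j
--         while i < len(data) and data[i] == ' ':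
--             i += 1
--     return [p for p in paths if p]
-- ===== SOURCE B (Python) =====
-- def parse_drop_paths(data):
--     """Parse tkinterdnd2 drop data which may contain multiple paths (space or brace-separated)."""
--     paths = []
--     rest = data.strip()
--     while rest:
--         if rest[0] == '{':
--             inner, sep, rest = rest[1:].partition('}')
--             if not sep:
--                 raise ValueError("unterminated brace group")
--             if inner:
--                 paths.append(inner)
--         else:
--             tok, _, rest = rest.partition(' ')
--             tok = tok.strip()
--             if tok:
--                 paths.append(tok)
--         rest = rest.lstrip(' ')
--     return paths
-- ===== Notes on version B (the rewrite author's own statement) =====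
-- stated objective: idiomatic
-- what changed: Replaced A's per-character index-cursor loop (manual inner while scans, data.index and slice arithmetic) by consuming a shrinking string with partition/lstrip (C-level scans) and appending only non-empty pieces, with no index arithmetic and no final filtering pass.
import Mathlib
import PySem

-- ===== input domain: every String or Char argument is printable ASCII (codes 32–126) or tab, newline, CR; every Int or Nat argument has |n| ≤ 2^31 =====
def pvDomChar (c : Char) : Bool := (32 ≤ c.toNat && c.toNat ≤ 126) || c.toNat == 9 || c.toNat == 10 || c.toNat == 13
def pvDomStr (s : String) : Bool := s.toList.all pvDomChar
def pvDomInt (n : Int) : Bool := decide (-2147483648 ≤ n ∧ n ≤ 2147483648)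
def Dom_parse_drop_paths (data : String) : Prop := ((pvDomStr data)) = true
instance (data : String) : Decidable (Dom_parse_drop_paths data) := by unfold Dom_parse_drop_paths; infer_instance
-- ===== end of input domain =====

-- B replaces A's index-cursor loop by consuming a shrinking character list with
-- partition-style splits (idiomatic; same cost). Where A raises ValueError
-- (unterminated '{'), B raises ValueError too; Pre_ excludes those inputs.

-- ===== PORT A =====
-- data.index('}', i): first index ≥ i holding '}' (none = ValueError)
def pvFindRB (cs : List Char) (i : Nat) : Option Nat :=
  if h : i < cs.length then
    if cs.getD i ' ' = '}' then some i else pvFindRB cs (i + 1)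
  else none
termination_by cs.length - i

-- inner `while j < len(data) and data[j] != ' ': j += 1`
def pvScanTok (cs : List Char) (j : Nat) : Nat :=
  if h : j < cs.length then
    if cs.getD j ' ' ≠ ' ' then pvScanTok cs (j + 1) else j
  else j
termination_by cs.length - j

-- trailing `while i < len(data) and data[i] == ' ': i += 1`
def pvSkipSp (cs : List Char) (i : Nat) : Nat :=
  if h : i < cs.length then
    if cs.getD i ' ' = ' ' then pvSkipSp cs (i + 1) else i
  else i
termination_by cs.length - i

-- A's main while-loop, cursor i over cs; fuel bounds the iteration count
-- (each iteration advances i, so cs.length + 1 fuel is always enough).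
-- On the ValueError path (no '}') the port just returns the filtered paths.
def pvLoopA (cs : List Char) (fuel : Nat) (i : Nat) (paths : List String) : List String :=
  match fuel with
  | 0 => paths.filter (fun p => p ≠ "")
  | fuel + 1 =>
    if i < cs.length then
      if cs.getD i ' ' = '{' then
        match pvFindRB cs i with
        | none => paths.filter (fun p => p ≠ "")   -- Python: raise ValueError
        | some e =>
          pvLoopA cs fuel (pvSkipSp cs (e + 1))
            (paths ++ [String.ofList ((cs.take e).drop (i + 1))])   -- data[i+1:end]
      else
        let j := pvScanTok cs i
        let token := PySem.Str.strip (String.ofList ((cs.take j).drop i))   -- data[i:j].strip()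
        pvLoopA cs fuel (pvSkipSp cs j)
          (if token ≠ "" then paths ++ [token] else paths)
    else paths.filter (fun p => p ≠ "")

def parse_drop_paths (data : String) : List String :=
  let cs := (PySem.Str.strip data).toList
  pvLoopA cs (cs.length + 1) 0 []

-- ===== PORT B =====
-- B's while-loop over the remaining characters `rest`; fuel as above.
-- On the ValueError path (no '}') the port returns the paths so far.
def pvLoopB (fuel : Nat) (rest : List Char) (paths : List String) : List String :=
  match fuel with
  | 0 => paths
  | fuel + 1 =>
    match rest with
    | [] => paths
    | c :: t =>
      if c = '{' then
        -- inner, sep, rest = rest[1:].partition('}')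
        let inner := t.takeWhile (fun d => d ≠ '}')
        match t.dropWhile (fun d => d ≠ '}') with
        | [] => paths                                   -- Python: raise ValueError
        | _ :: r =>
          pvLoopB fuel (r.dropWhile (fun d => d = ' '))
            (if inner ≠ [] then paths ++ [String.ofList inner] else paths)
      else
        -- tok, _, rest = rest.partition(' '); tok = tok.strip()
        let tok := PySem.Str.strip (String.ofList (rest.takeWhile (fun d => d ≠ ' ')))
        let r := (rest.dropWhile (fun d => d ≠ ' ')).tail
        pvLoopB fuel (r.dropWhile (fun d => d = ' '))
          (if tok ≠ "" then paths ++ [tok] else paths)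

def parse_drop_paths_alt (data : String) : List String :=
  let cs := (PySem.Str.strip data).toList
  pvLoopB (cs.length + 1) cs []

-- ===== PRECONDITION & SPEC =====
-- Pre_ excludes exactly the inputs on which Python A raises ValueError: those whose
-- stripped form, read by the 3-state scanner below (0 = between paths, 1 = inside a
-- bare token, 2 = inside a '{...}' group), ends inside an unterminated brace group.
def pvBraceStep (st : Nat) (c : Char) : Nat :=
  if st = 2 then (if c = '}' then 0 else 2)
  else if st = 1 then (if c = ' ' then 0 else 1)
  else if c = ' ' then 0 else if c = '{' then 2 else 1

def Pre_parse_drop_paths (data : String) : Prop :=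
  ((PySem.Str.strip data).toList.foldl pvBraceStep 0) ≠ 2

instance (data : String) : Decidable (Pre_parse_drop_paths data) := by
  unfold Pre_parse_drop_paths; infer_instance

def pvWitness_parse_drop_paths : String := "  a.txt {b c.txt}  {}  d "

def Spec_parse_drop_paths (data : String) (out : List String) : Prop := out = parse_drop_paths_alt data
instance (data : String) (out : List String) : Decidable (Spec_parse_drop_paths data out) := by unfold Spec_parse_drop_paths; infer_instance

-- ===== CLAIM (what is proved, stated in full; the proofs are below) =====
def Claim_equal_parse_drop_paths : Prop := ∀ (data : String), Dom_parse_drop_paths data → Pre_parse_drop_paths data → Spec_parse_drop_paths data (parse_drop_paths data)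



-- ===== LEMMAS AND PROOFS =====

lemma pv_take_takeWhile (p : Char → Bool) (t : List Char) :
    t.take (t.takeWhile p).length = t.takeWhile p := by
  induction t with
  | nil => simp
  | cons a t ih => by_cases h : p a <;> simp [h, ih]

lemma pv_drop_takeWhile (p : Char → Bool) (t : List Char) :
    t.drop (t.takeWhile p).length = t.dropWhile p := by
  induction t with
  | nil => simp
  | cons a t ih => by_cases h : p a <;> simp [h, ih]

lemma pvFindRB_eq (cs : List Char) (i : Nat) :
    pvFindRB cs i =
      if (cs.drop i).any (fun d => d = '}')
      then some (i + ((cs.drop i).takeWhile (fun d => d ≠ '}')).length)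
      else none := by
  induction i using pvFindRB.induct (cs := cs) with
  | case1 i h hc =>
    rw [List.getD_eq_getElem _ _ h] at hc
    rw [pvFindRB, dif_pos h, if_pos (by rw [List.getD_eq_getElem _ _ h]; exact hc),
      List.drop_eq_getElem_cons h, hc]
    set t := List.drop (i + 1) cs with hT
    simp
  | case2 i h hc ih =>
    rw [List.getD_eq_getElem _ _ h] at hc
    rw [pvFindRB, dif_pos h, if_neg (by rw [List.getD_eq_getElem _ _ h]; exact hc), ih,
      List.drop_eq_getElem_cons h]
    set t := List.drop (i + 1) cs with hT
    by_cases hany : t.any (fun d => d = '}') <;> simp [hany, hc] <;> omega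
  | case3 i h =>
    rw [pvFindRB, dif_neg h]
    have : cs.drop i = [] := List.drop_eq_nil_of_le (by omega)
    simp [this]

lemma pvScanTok_eq (cs : List Char) (i : Nat) :
    pvScanTok cs i = i + ((cs.drop i).takeWhile (fun d => d ≠ ' ')).length := by
  induction i using pvScanTok.induct (cs := cs) with
  | case1 i h hc ih =>
    rw [List.getD_eq_getElem _ _ h] at hc
    rw [pvScanTok, dif_pos h, if_pos (by rw [List.getD_eq_getElem _ _ h]; exact hc), ih,
      List.drop_eq_getElem_cons h]
    set t := List.drop (i + 1) cs with hT
    simp [hc]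
    omega
  | case2 i h hc =>
    rw [List.getD_eq_getElem _ _ h] at hc
    rw [pvScanTok, dif_pos h, if_neg (by rw [List.getD_eq_getElem _ _ h]; exact hc),
      List.drop_eq_getElem_cons h]
    set t := List.drop (i + 1) cs with hT
    simp at hc
    simp [hc]
  | case3 i h =>
    rw [pvScanTok, dif_neg h]
    have : cs.drop i = [] := List.drop_eq_nil_of_le (by omega)
    simp [this]

lemma pvSkipSp_eq (cs : List Char) (i : Nat) :
    pvSkipSp cs i = i + ((cs.drop i).takeWhile (fun d => d = ' ')).length := by
  induction i using pvSkipSp.induct (cs := cs) with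
  | case1 i h hc ih =>
    rw [List.getD_eq_getElem _ _ h] at hc
    rw [pvSkipSp, dif_pos h, if_pos (by rw [List.getD_eq_getElem _ _ h]; exact hc), ih,
      List.drop_eq_getElem_cons h]
    set t := List.drop (i + 1) cs with hT
    simp [hc] <;> omega
  | case2 i h hc =>
    rw [List.getD_eq_getElem _ _ h] at hc
    rw [pvSkipSp, dif_pos h, if_neg (by rw [List.getD_eq_getElem _ _ h]; exact hc),
      List.drop_eq_getElem_cons h]
    set t := List.drop (i + 1) cs with hT
    simp [hc]
  | case3 i h =>
    rw [pvSkipSp, dif_neg h]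
    have : cs.drop i = [] := List.drop_eq_nil_of_le (by omega)
    simp [this]

lemma pv_drop_skipSp (cs : List Char) (i : Nat) :
    cs.drop (pvSkipSp cs i) = (cs.drop i).dropWhile (fun d => d = ' ') := by
  rw [pvSkipSp_eq, ← pv_drop_takeWhile (fun d => d = ' ') (cs.drop i), List.drop_drop]

lemma pv_skipSp_ge (cs : List Char) (i : Nat) : i ≤ pvSkipSp cs i := by
  rw [pvSkipSp_eq]; omega

lemma pv_filter_append (pa : List String) (s : String) :
    (pa ++ [s]).filter (fun p => p ≠ "") =
      pa.filter (fun p => p ≠ "") ++ (if s ≠ "" then [s] else []) := by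
  rw [List.filter_append]
  by_cases h : s = "" <;> simp [h]

lemma pv_ofList_ne_empty (l : List Char) : (String.ofList l ≠ "") ↔ l ≠ [] := by
  constructor
  · intro h hn; exact h (by simp [hn])
  · intro h hn
    exact h (by simpa using congrArg String.toList hn)

lemma pv_dropWhile_head_false (p : Char → Bool) (l : List Char) (d : Char) (r : List Char)
    (h : l.dropWhile p = d :: r) : p d = false := by
  induction l with
  | nil => simp at h
  | cons a t ih =>
    rw [List.dropWhile_cons] at h
    by_cases hp : p a
    · exact ih (by simpa [hp] using h)
    · rw [if_neg hp] at h
      injection h with h1 _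
      rw [← h1]
      simpa using hp

lemma pvLoop_eq (cs : List Char) (fa : Nat) :
    ∀ (fb i : Nat) (pa pb : List String),
      cs.length - i < fa → cs.length - i < fb →
      pa.filter (fun p => p ≠ "") = pb →
      pvLoopA cs fa i pa = pvLoopB fb (cs.drop i) pb := by
  induction fa with
  | zero => intro _ i _ _ h; omega
  | succ fa ih =>
    intro fb i pa pb hfa hfb hpp
    match fb with
    | 0 => omega
    | fb + 1 =>
      by_cases hi : i < cs.length
      · have hdrop : cs.drop i = cs[i] :: cs.drop (i + 1) := List.drop_eq_getElem_cons hi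
        rw [pvLoopA, if_pos hi, List.getD_eq_getElem _ _ hi, hdrop, pvLoopB]
        by_cases hc : cs[i] = '{'
        · rw [if_pos hc, if_pos hc, pvFindRB_eq, hdrop]
          by_cases hany : (cs.drop (i + 1)).any (fun d => d = '}')
          · have hcond : ((cs[i] :: cs.drop (i + 1)).any (fun d => d = '}')) = true := by
              rw [List.any_cons, hany, Bool.or_true]
            rw [if_pos hcond]
            have hctw : ((cs[i] :: cs.drop (i + 1)).takeWhile (fun d => d ≠ '}')) =
                cs[i] :: (cs.drop (i + 1)).takeWhile (fun d => d ≠ '}') := by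
              simp [hc]
            rw [hctw]
            set k := ((cs.drop (i + 1)).takeWhile (fun d => d ≠ '}')).length with hk
            have hdw : (cs.drop (i + 1)).drop k = (cs.drop (i + 1)).dropWhile (fun d => d ≠ '}') :=
              pv_drop_takeWhile _ _
            have hne : (cs.drop (i + 1)).dropWhile (fun d => d ≠ '}') ≠ [] := by
              intro hnil
              rw [List.dropWhile_eq_nil_iff] at hnil
              rw [List.any_eq_true] at hany
              obtain ⟨x, hx, hx2⟩ := hany
              have := hnil x hx
              simp at hx2 this
              exact this hx2
            match hm : (cs.drop (i + 1)).dropWhile (fun d => d ≠ '}') with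
            | [] => exact absurd hm hne
            | _ :: r =>
              dsimp only
              have hlen : (cs[i] :: (cs.drop (i+1)).takeWhile (fun d => d ≠ '}')).length = k + 1 := by
                simp [hk]
              have hslice :
                  (cs.take (i + (cs[i] :: (cs.drop (i+1)).takeWhile (fun d => d ≠ '}')).length)).drop (i + 1)
                  = (cs.drop (i + 1)).takeWhile (fun d => d ≠ '}') := by
                rw [List.drop_take, hlen]
                have h2 : i + (k + 1) - (i + 1) = k := by omega
                rw [h2, pv_take_takeWhile]
              rw [hslice]
              have hr : cs.drop (i + 1 + k + 1) = r := by
                have h1 : cs.drop (i + 1 + k) = (cs.drop (i + 1)).drop k := by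
                  rw [List.drop_drop]
                have h2 : cs.drop (i + 1 + k + 1) = (cs.drop (i + 1 + k)).drop 1 := by
                  rw [List.drop_drop]
                rw [h2, h1, hdw, hm]
                simp
              have harg :
                  cs.drop (pvSkipSp cs (i + (cs[i] :: (cs.drop (i+1)).takeWhile (fun d => d ≠ '}')).length + 1))
                  = r.dropWhile (fun d => d = ' ') := by
                rw [pv_drop_skipSp]
                have h3 : i + (cs[i] :: (cs.drop (i+1)).takeWhile (fun d => d ≠ '}')).length + 1
                    = i + 1 + k + 1 := by rw [hlen]; omega
                rw [h3, hr]
              rw [← harg, hlen]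
              apply ih
              · have h4 := pv_skipSp_ge cs (i + (k + 1) + 1)
                omega
              · have h4 := pv_skipSp_ge cs (i + (k + 1) + 1)
                omega
              · rw [pv_filter_append, hpp]
                by_cases hin : (cs.drop (i + 1)).takeWhile (fun d => d ≠ '}') = []
                · rw [if_neg (by rw [pv_ofList_ne_empty]; simpa using hin), if_neg (by simpa using hin)]
                  simp
                · rw [if_pos (by rw [pv_ofList_ne_empty]; simpa using hin), if_pos (by simpa using hin)]
          · have hcond : ¬ ((cs[i] :: cs.drop (i + 1)).any (fun d => d = '}')) = true := by
              rw [List.any_cons]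
              simp [hany, hc]
            have hdw0 : (cs.drop (i + 1)).dropWhile (fun d => d ≠ '}') = [] := by
              rw [List.dropWhile_eq_nil_iff]
              intro x hx
              by_contra hxx
              exact hany (List.any_eq_true.mpr ⟨x, hx, by simpa using hxx⟩)
            rw [if_neg hcond, hpp, hdw0]
        · rw [if_neg hc, if_neg hc, pvScanTok_eq, hdrop]
          set tw := ((cs[i] :: cs.drop (i + 1)).takeWhile (fun d => d ≠ ' ')) with htw
          have hprog : i < pvSkipSp cs (i + tw.length) := by
            by_cases hsp : cs[i] = ' '
            · have htw0 : tw = [] := by simp [htw, hsp]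
              rw [pvSkipSp_eq, htw0]
              have h5 : cs.drop (i + 0) = cs[i] :: cs.drop (i + 1) := by simpa using hdrop
              simp only [List.length_nil, h5]
              simp [hsp]
            · have h6 : tw = cs[i] :: (cs.drop (i + 1)).takeWhile (fun d => d ≠ ' ') := by
                rw [htw, List.takeWhile_cons]
                simp [hsp]
              have h1 : 1 ≤ tw.length := by rw [h6]; simp
              have := pv_skipSp_ge cs (i + tw.length)
              omega
          have hslice : (cs.take (i + tw.length)).drop i = tw := by
            rw [List.drop_take]
            have h7 : i + tw.length - i = tw.length := by omega
            rw [h7, htw, ← hdrop, pv_take_takeWhile]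
          have harg : cs.drop (pvSkipSp cs (i + tw.length))
              = (((cs[i] :: cs.drop (i+1)).dropWhile (fun d => d ≠ ' ')).tail).dropWhile (fun d => d = ' ') := by
            rw [pv_drop_skipSp]
            have h8 : cs.drop (i + tw.length) = (cs.drop i).drop tw.length := by
              rw [List.drop_drop]
            rw [h8, hdrop, htw, pv_drop_takeWhile]
            match hm : (cs[i] :: cs.drop (i + 1)).dropWhile (fun d => d ≠ ' ') with
            | [] => simp
            | d :: r =>
              have hd : d = ' ' := by
                have h9 := pv_dropWhile_head_false _ _ _ _ hm
                simpa using h9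
              rw [hd]
              simp
          dsimp only
          rw [hslice, ← harg]
          apply ih
          · omega
          · omega
          · by_cases ht : PySem.Str.strip (String.ofList tw) = ""
            · rw [if_neg (by simpa using ht), if_neg (by simpa using ht), hpp]
            · rw [if_pos (by simpa using ht), if_pos (by simpa using ht), pv_filter_append, hpp,
                if_pos (by simpa using ht)]
      · have hnil : cs.drop i = [] := List.drop_eq_nil_of_le (by omega)
        rw [pvLoopA, if_neg hi, hnil, pvLoopB, hpp]

-- ===== VERDICT (by name: the statement is the Claim_ definition above) =====
theorem parse_drop_paths_spec : Claim_equal_parse_drop_paths := by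
  intro data _ _
  unfold Spec_parse_drop_paths parse_drop_paths parse_drop_paths_alt
  have h := pvLoop_eq ((PySem.Str.strip data).toList)
    ((PySem.Str.strip data).toList.length + 1)
    ((PySem.Str.strip data).toList.length + 1) 0 [] []
    (by omega) (by omega) (by simp)
  simpa using h
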